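-- pv_equiv track=rewrite | github.com/noorulameenkm/DataStructuresAlgorithms | LeetCode/30-day-challenge/September/September 8th - September 14th/Combination_sumIII.py | backtrack
-- ===== SOURCE A (Python) =====
-- def backtrack(k, n):
--     results = []
--
--     def tracker(remaining_sum, combination, next_start):
--         if remaining_sum == 0 and len(combination) == k:
--             results.append(list(combination))
--             return
--
--         if remaining_sum < 0 and len(combination) == k:
--             return
--
--         for i in range(next_start, 10):
--             combination.append(i)
--             tracker(remaining_sum - i, combination, i + 1)
--             combination.pop()
--
--
--     tracker(n, [], 1)
--
--     return results
-- ===== SOURCE B (Python) =====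
-- def backtrack(k, n):
--     results = []
--     for mask in range(511, -1, -1):
--         combo = [d for d in range(1, 10) if mask // 2 ** (9 - d) % 2 == 1]
--         if len(combo) == k and sum(combo) == n:
--             results.append(combo)
--     return results
-- ===== Notes on version B (the rewrite author's own statement) =====
-- stated objective: simpler
-- what changed: Replaced the recursive DFS backtracking over partial combinations with a single flat loop over all 512 bitmask-encoded subsets of the digits 1-9, keeping each subset whose size is k and whose sum is n (descending mask order reproduces A's emission order).
import Mathlib
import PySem

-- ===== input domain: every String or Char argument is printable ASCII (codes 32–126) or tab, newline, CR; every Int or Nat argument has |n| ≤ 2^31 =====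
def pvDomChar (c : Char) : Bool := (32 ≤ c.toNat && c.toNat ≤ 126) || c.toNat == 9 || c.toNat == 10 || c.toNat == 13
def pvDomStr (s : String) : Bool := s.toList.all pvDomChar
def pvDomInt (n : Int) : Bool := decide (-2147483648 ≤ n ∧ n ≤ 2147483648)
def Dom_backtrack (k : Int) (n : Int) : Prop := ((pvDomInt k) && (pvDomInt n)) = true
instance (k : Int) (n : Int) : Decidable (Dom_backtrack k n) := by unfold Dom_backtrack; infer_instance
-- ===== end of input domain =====

-- B replaces A's DFS backtracking with a flat scan over all 512 digit subsets encoded as bitmasks (objective: simpler).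

-- ===== PORT A =====
-- inner 'tracker'; results is the accumulator, combination.append/pop becomes comb ++ [i].
-- The Nat fuel only makes the recursion structural: next ≤ 10 always, so fuel 10 from the
-- initial call is never exhausted (the fuel-0 branch is unreachable).
def trackerA (fuel : Nat) (k : Int) (rem : Int) (comb : List Int) (next : Int)
    (results : List (List Int)) : List (List Int) :=
  match fuel with
  | 0 => results
  | m + 1 =>
    if rem = 0 ∧ (comb.length : Int) = k then results ++ [comb]
    else if rem < 0 ∧ (comb.length : Int) = k then results
    else (PySem.List.pyRange next 10 1).foldl
      (fun acc i => trackerA m k (rem - i) (comb ++ [i]) (i + 1) acc) results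

def backtrack (k : Int) (n : Int) : List (List Int) := trackerA 10 k n [] 1 []

-- ===== PORT B =====
-- mask // 2 ** (9 - d) % 2 : d ∈ range(1,10) so 9 - d ≥ 0; the exponent is ported with .toNat (exact here).
def backtrack_alt (k : Int) (n : Int) : List (List Int) :=
  (PySem.List.pyRange 511 (-1) (-1)).foldl
    (fun results mask =>
      let combo := (PySem.List.pyRange 1 10 1).filter
        (fun d => PySem.Int.mod (PySem.Int.floordiv mask (2 ^ (9 - d).toNat)) 2 = 1)
      if (combo.length : Int) = k ∧ combo.sum = n then results ++ [combo] else results)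
    []

-- ===== PRECONDITION & SPEC =====
def Spec_backtrack (k : Int) (n : Int) (out : List (List Int)) : Prop := out = backtrack_alt k n
instance (k : Int) (n : Int) (out : List (List Int)) : Decidable (Spec_backtrack k n out) := by unfold Spec_backtrack; infer_instance

-- ===== CLAIM (what is proved, stated in full; the proofs are below) =====
def Claim_equal_backtrack : Prop := ∀ (k : Int) (n : Int), Dom_backtrack k n → Spec_backtrack k n (backtrack k n)

-- ===== LEMMAS AND PROOFS =====

-- all strictly increasing digit lists with entries in [next, 9], in DFS preorder (A's visit order)
def FF : Nat → Int → List (List Int)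
  | 0, _ => [[]]
  | m + 1, next =>
    [] :: (PySem.List.pyRange next 10 1).flatMap (fun i => (FF m (i + 1)).map (i :: ·))

-- the digit subset a mask selects (B's inner comprehension)
def comboOf (mask : Int) : List Int :=
  (PySem.List.pyRange 1 10 1).filter
    (fun d => PySem.Int.mod (PySem.Int.floordiv mask (2 ^ (9 - d).toNat)) 2 = 1)

def masksCombos : List (List Int) := (PySem.List.pyRange 511 (-1) (-1)).map comboOf

lemma trackerA_char (k : Int) :
    ∀ (fuel : Nat) (next rem : Int) (comb : List Int) (res : List (List Int)),
      (10 - next).toNat < fuel →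
      trackerA fuel k rem comb next res
        = res ++ ((FF fuel next).filter
            (fun t => decide ((comb.length : Int) + t.length = k ∧ t.sum = rem))).map (comb ++ ·) := by
  intro fuel
  induction fuel with
  | zero => intro next rem comb res h; omega
  | succ m ih =>
    intro next rem comb res h
    simp only [trackerA]
    split_ifs with c1 c2
    · -- rem = 0 ∧ len = k : the node itself is emitted, no deeper hit possible
      simp only [FF]
      rw [List.filter_cons_of_pos (by simp; omega)]
      rw [List.filter_eq_nil_iff.mpr ?emp]
      case emp =>
        intro t ht
        rw [List.mem_flatMap] at ht
        obtain ⟨i, hi, ht⟩ := ht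
        rw [List.mem_map] at ht
        obtain ⟨t', _, rfl⟩ := ht
        simp only [decide_eq_true_eq, not_and, List.length_cons]
        intro hlen
        exfalso; push_cast at hlen; omega
      simp
    · -- rem < 0 ∧ len = k : pruned, and indeed nothing would match
      rw [List.filter_eq_nil_iff.mpr ?emp2, List.map_nil, List.append_nil]
      case emp2 =>
        intro t ht
        simp only [FF, List.mem_cons, List.mem_flatMap, List.mem_map] at ht
        rcases ht with rfl | ⟨i, hi, t', _, rfl⟩
        · simp only [decide_eq_true_eq, not_and, List.length_nil, List.sum_nil]
          intro _; omega
        · simp only [decide_eq_true_eq, not_and, List.length_cons]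
          intro hlen; exfalso; push_cast at hlen; omega
    · -- recursive case
      have hstep : ∀ i ∈ PySem.List.pyRange next 10 1, ∀ acc : List (List Int),
          trackerA m k (rem - i) (comb ++ [i]) (i + 1) acc
            = acc ++ ((FF m (i + 1)).filter
                (fun t => decide (((comb ++ [i]).length : Int) + t.length = k ∧ t.sum = rem - i))).map
                  ((comb ++ [i]) ++ ·) := by
        intro i hi acc
        have hb := PySem.List.mem_pyRange_one.mp hi
        exact ih (i + 1) (rem - i) (comb ++ [i]) acc (by omega)
      rw [PySem.List.foldl_congr_mem' _ _ _ _ hstep]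
      rw [PySem.List.foldl_append_eq_flatMap]
      congr 1
      simp only [FF]
      rw [List.filter_cons_of_neg (by simp; omega)]
      rw [List.filter_flatMap]
      rw [List.map_flatMap]
      apply List.flatMap_congr
      intro i _
      rw [List.filter_map, List.map_map]
      congr 1
      · funext t
        simp only [Function.comp_apply]
        simp
      · apply List.filter_congr
        intro t _
        simp only [Function.comp_apply]
        rw [decide_eq_decide]
        simp only [List.length_append, List.length_cons, List.length_nil, List.sum_cons]
        push_cast
        constructor
        · rintro ⟨h1, h2⟩; exact ⟨by omega, by omega⟩
        · rintro ⟨h1, h2⟩; exact ⟨by omega, by omega⟩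

lemma backtrack_char (k n : Int) :
    backtrack k n = (FF 10 1).filter (fun t => decide ((t.length : Int) = k ∧ t.sum = n)) := by
  unfold backtrack
  rw [trackerA_char k 10 1 n [] [] (by norm_num)]
  simp

lemma backtrack_alt_eq (k n : Int) :
    backtrack_alt k n = masksCombos.filter (fun t => decide ((t.length : Int) = k ∧ t.sum = n)) := by
  unfold backtrack_alt
  rw [show (fun (results : List (List Int)) (mask : Int) =>
      let combo := (PySem.List.pyRange 1 10 1).filter
        (fun d => PySem.Int.mod (PySem.Int.floordiv mask (2 ^ (9 - d).toNat)) 2 = 1)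
      if (combo.length : Int) = k ∧ combo.sum = n then results ++ [combo] else results)
    = (fun results mask =>
      if (fun mask => decide (((comboOf mask).length : Int) = k ∧ (comboOf mask).sum = n)) mask
          = true
      then results ++ [comboOf mask] else results) from by
    funext r mask; simp [comboOf]]
  rw [PySem.List.foldl_append_if]
  unfold masksCombos
  rw [List.filter_map]
  simp [Function.comp_def]

set_option maxRecDepth 100000 in
lemma len_le_9 : (∀ t ∈ FF 10 1, t.length ≤ 9) ∧ (∀ t ∈ masksCombos, t.length ≤ 9) := by
  decide

set_option maxRecDepth 100000 in
lemma filter_len_eq : ∀ j ∈ Finset.range 10,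
    (FF 10 1).filter (fun t => t.length == j) = masksCombos.filter (fun t => t.length == j) := by
  decide

-- ===== VERDICT (by name: the statement is the Claim_ definition above) =====
theorem backtrack_spec : Claim_equal_backtrack := by
  unfold Claim_equal_backtrack
  intro k n _
  unfold Spec_backtrack
  rw [backtrack_char, backtrack_alt_eq]
  by_cases hk : 0 ≤ k ∧ k ≤ 9
  · obtain ⟨hk0, hk9⟩ := hk
    have hfl : ∀ (X : List (List Int)),
        X.filter (fun t => decide ((t.length : Int) = k ∧ t.sum = n))
          = (X.filter (fun t => t.length == k.toNat)).filter (fun t => decide (t.sum = n)) := by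
      intro X
      rw [List.filter_filter]
      apply List.filter_congr
      intro t _
      by_cases h1 : (t.length : Int) = k
      · have h1' : t.length = k.toNat := by omega
        by_cases h2 : t.sum = n
        · simp [h2, h1', hk0]
        · simp [h2, h1', hk0]
      · have h1' : t.length ≠ k.toNat := by omega
        simp [h1, h1']
    rw [hfl, hfl, filter_len_eq k.toNat (by simp [Finset.mem_range]; omega)]
  · have hk' : k < 0 ∨ 9 < k := by omega
    rw [List.filter_eq_nil_iff.mpr, List.filter_eq_nil_iff.mpr]
    · intro t ht
      have := len_le_9.2 t ht
      simp only [decide_eq_true_eq, not_and]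
      intro h; omega
    · intro t ht
      have := len_le_9.1 t ht
      simp only [decide_eq_true_eq, not_and]
      intro h; omega
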